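-- pv_equiv track=rewrite | github.com/mvgugaev/Python-Algorithm-Stepik | binary_search_with_index_equal.py | bin_search_with_index_equal
-- ===== SOURCE A (Python) =====
-- def bin_search_with_index_equal(array: list) -> bool:
--     start, end = 0, len(array) - 1
--
--     while start <= end:
--
--         # Get center of result
--         center = int((start + end) / 2)
--
--         if center == array[center]:
--             return True
--         elif center < array[center]:
--             end = center - 1
--         else:
--             start = center + 1
--
--     return False
-- ===== SOURCE B (Python) =====
-- def bin_search_with_index_equal(array: list) -> bool:
--     # Recursive reformulation over (offset, length) instead of an iterative
--     # (start, end) loop; same probe sequence, so the result is identical.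
--     def go(lo, n):
--         if n <= 0:
--             return False
--         c = lo + (n - 1) // 2
--         v = array[c]
--         if v == c:
--             return True
--         if v > c:
--             return go(lo, c - lo)
--         return go(c + 1, lo + n - c - 1)
--     return go(0, len(array))
-- ===== Notes on version B (the rewrite author's own statement) =====
-- stated objective: alternative
-- what changed: The iterative (start,end) while-loop is replaced by a recursive helper over an (offset,length) state representation with midpoint lo + (n-1)//2; same probe sequence, different decomposition and state.
import Mathlib
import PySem

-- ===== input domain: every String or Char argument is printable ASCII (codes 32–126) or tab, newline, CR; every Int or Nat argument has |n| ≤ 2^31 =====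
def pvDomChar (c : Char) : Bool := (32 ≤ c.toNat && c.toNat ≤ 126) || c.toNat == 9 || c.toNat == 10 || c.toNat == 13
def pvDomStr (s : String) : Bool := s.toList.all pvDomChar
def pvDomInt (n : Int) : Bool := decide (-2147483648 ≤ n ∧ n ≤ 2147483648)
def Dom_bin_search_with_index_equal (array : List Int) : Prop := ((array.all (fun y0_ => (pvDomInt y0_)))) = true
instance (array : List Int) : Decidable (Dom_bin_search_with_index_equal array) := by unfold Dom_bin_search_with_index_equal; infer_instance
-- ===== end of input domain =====

-- B replaces the iterative (start,end) loop by a recursive helper over an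
-- (offset,length) state; same probe sequence, so the same result (objective: alternative).

-- ===== PORT A =====
-- The while loop, ported as structural recursion on the interval size.
-- Whenever center is computed, start ≤ end and start ≥ 0 hold on every state
-- reachable from the entry call, so int((start+end)/2) = floor division, exact here.
def pvALoop (array : List Int) (start e : Int) : Bool :=
  if _h : start ≤ e then
    let center := PySem.Int.floordiv (start + e) 2
    match PySem.List.pyGet? array center with
    | none => false   -- Python would raise IndexError; unreachable from the entry call
    | some v =>
      if center = v then true
      else if center < v then pvALoop array start (center - 1)
      else pvALoop array (center + 1) e
  else false
termination_by (e - start + 1).toNat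
decreasing_by
  · have := PySem.Int.floordiv_two_mid_bounds (lo := start) (hi := e) _h
    omega
  · have := PySem.Int.floordiv_two_mid_bounds (lo := start) (hi := e) _h
    omega

def bin_search_with_index_equal (array : List Int) : Bool :=
  pvALoop array 0 ((array.length : Int) - 1)

-- ===== PORT B =====
-- go(lo, n): recursion on the length n of the remaining segment.
def pvBGo (array : List Int) (lo n : Int) : Bool :=
  if _h : n ≤ 0 then false
  else
    let c := lo + PySem.Int.floordiv (n - 1) 2
    match PySem.List.pyGet? array c with
    | none => false   -- Python would raise IndexError; unreachable from the entry call
    | some v =>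
      if v = c then true
      else if v > c then pvBGo array lo (c - lo)
      else pvBGo array (c + 1) (lo + n - c - 1)
termination_by n.toNat
decreasing_by
  · have := PySem.Int.floordiv_two_mid_bounds (lo := 0) (hi := n - 1) (by omega)
    simp only [zero_add] at this; omega
  · have := PySem.Int.floordiv_two_mid_bounds (lo := 0) (hi := n - 1) (by omega)
    simp only [zero_add] at this; omega

def bin_search_with_index_equal_alt (array : List Int) : Bool :=
  pvBGo array 0 (array.length : Int)

-- ===== PRECONDITION & SPEC =====
def Spec_bin_search_with_index_equal (array : List Int) (out : Bool) : Prop := out = bin_search_with_index_equal_alt array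
instance (array : List Int) (out : Bool) : Decidable (Spec_bin_search_with_index_equal array out) := by unfold Spec_bin_search_with_index_equal; infer_instance

-- ===== CLAIM (what is proved, stated in full; the proofs are below) =====
def Claim_equal_bin_search_with_index_equal : Prop := ∀ (array : List Int), Dom_bin_search_with_index_equal array → Spec_bin_search_with_index_equal array (bin_search_with_index_equal array)

-- ===== LEMMAS AND PROOFS =====

-- The two midpoint formulas agree: start + (n-1)//2 = (start+e)//2 with n = e-start+1.
lemma pv_mid_eq (start e : Int) (_h : start ≤ e) :
    start + PySem.Int.floordiv (e - start) 2 = PySem.Int.floordiv (start + e) 2 := by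
  have h1 := PySem.Int.floordiv_mul_add_mod (e - start) 2
  have h2 := PySem.Int.floordiv_mul_add_mod (start + e) 2
  have m1 := PySem.Int.mod_two_eq (e - start)
  have m2 := PySem.Int.mod_two_eq (start + e)
  omega

-- Loop ↔ recursion: B's state (lo, n) corresponds to A's (start, end) = (lo, lo+n-1).
lemma pv_loop_eq (array : List Int) :
    ∀ (k : Nat) (start e : Int), (e - start + 1).toNat = k →
      pvALoop array start e = pvBGo array start (e - start + 1) := by
  intro k
  induction k using Nat.strong_induction_on with
  | _ k ih =>
    intro start e hk
    rw [pvALoop, pvBGo]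
    by_cases h : start ≤ e
    · simp only [h, dif_pos, show ¬ (e - start + 1 ≤ 0) by omega, dif_neg, not_false_iff]
      have hb := PySem.Int.floordiv_two_mid_bounds (lo := start) (hi := e) h
      set c := PySem.Int.floordiv (start + e) 2 with hc
      have hmid2 : start + PySem.Int.floordiv (e - start + 1 - 1) 2 = c := by
        rw [show e - start + 1 - 1 = e - start from by ring]
        exact pv_mid_eq start e h
      rw [hmid2]
      cases hv : PySem.List.pyGet? array c with
      | none => rfl
      | some v =>
        dsimp only
        by_cases he : c = v
        · simp [he]
        · rw [if_neg he, if_neg (show ¬ v = c from fun hh => he hh.symm)]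
          by_cases hlt : c < v
          · rw [if_pos hlt, if_pos (show v > c from hlt)]
            rw [ih (c - 1 - start + 1).toNat (by omega) start (c - 1) rfl]
            congr 1; omega
          · rw [if_neg hlt, if_neg (show ¬ v > c from hlt)]
            rw [ih (e - (c + 1) + 1).toNat (by omega) (c + 1) e rfl]
            congr 1; omega
    · simp [h, show e - start + 1 ≤ 0 by omega]

-- ===== VERDICT (by name: the statement is the Claim_ definition above) =====
theorem bin_search_with_index_equal_spec : Claim_equal_bin_search_with_index_equal := by
  intro array _
  unfold Spec_bin_search_with_index_equal bin_search_with_index_equal bin_search_with_index_equal_alt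
  have := pv_loop_eq array ((array.length : Int) - 1 - 0 + 1).toNat 0 ((array.length : Int) - 1) rfl
  rw [this]
  congr 1; omega
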